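-- pv_equiv track=rewrite | github.com/loopsleasing-png/quantum-cracker | scripts/experiment/superposition_256_oracles.py | nibble_longest_run
-- ===== SOURCE A (Python) =====
-- def nibble_longest_run(nibbles):
--     """Longest consecutive run of same nibble."""
--     max_run = 1
--     current = 1
--     for i in range(1, len(nibbles)):
--         if nibbles[i] == nibbles[i - 1]:
--             current += 1
--             max_run = max(max_run, current)
--         else:
--             current = 1
--     return max_run
-- ===== SOURCE B (Python) =====
-- def nibble_longest_run(nibbles):
--     """Longest consecutive run of same nibble, via run-length encoding."""
--     runs = []
--     for x in nibbles:
--         if runs and runs[-1][0] == x: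
--             y, n = runs[-1]
--             runs[-1] = (y, n + 1)
--         else:
--             runs.append((x, 1))
--     return max((n for _, n in runs), default=1)
-- ===== Notes on version B (the rewrite author's own statement) =====
-- stated objective: alternative
-- what changed: Replaces the inline running-counter/max-tracker over indices with a group-then-reduce decomposition: build the run-length encoding of the list, then take the maximum run length (default 1 for empty input).
import Mathlib
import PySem

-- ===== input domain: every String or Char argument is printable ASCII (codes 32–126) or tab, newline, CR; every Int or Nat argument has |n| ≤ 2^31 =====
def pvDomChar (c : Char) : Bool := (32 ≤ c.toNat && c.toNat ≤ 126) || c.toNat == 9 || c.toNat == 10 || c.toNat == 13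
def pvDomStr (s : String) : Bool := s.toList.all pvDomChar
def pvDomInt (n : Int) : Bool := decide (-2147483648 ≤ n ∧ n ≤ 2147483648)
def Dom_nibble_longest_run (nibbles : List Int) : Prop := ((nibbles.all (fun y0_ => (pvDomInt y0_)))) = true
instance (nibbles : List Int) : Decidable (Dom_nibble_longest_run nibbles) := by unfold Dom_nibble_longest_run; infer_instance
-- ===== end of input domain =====

-- B replaces A's inline running-counter/max-tracker with a run-length-encoding
-- pass followed by a maximum over the run lengths (alternative decomposition, same cost).


-- ===== PORT A =====
-- for i in range(1, len(nibbles)): compare nibbles[i] with nibbles[i-1], carrying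
-- (max_run, current).  Both indices are always in range, so pyGetD is exact here.
def nibble_longest_run (nibbles : List Int) : Int :=
  let st := (PySem.List.pyRange 1 nibbles.length 1).foldl
    (fun (st : Int × Int) i =>
      if PySem.List.pyGetD nibbles i 0 = PySem.List.pyGetD nibbles (i - 1) 0 then
        (max st.1 (st.2 + 1), st.2 + 1)
      else
        (st.1, 1))
    (1, 1)
  st.1

-- ===== PORT B =====
-- one step of Source B's RLE loop: extend the last run (runs[-1] = (y, n+1)) or append (x, 1)
def rleAdd (runs : List (Int × Int)) (x : Int) : List (Int × Int) :=
  match runs.getLast? with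
  | some (y, n) => if y = x then runs.dropLast ++ [(y, n + 1)] else runs ++ [(x, 1)]
  | none => [(x, 1)]

-- build the run-length encoding, then max(run lengths, default=1)
def nibble_longest_run_alt (nibbles : List Int) : Int :=
  let runs := nibbles.foldl rleAdd []
  (PySem.List.max? (runs.map (·.2)) (fun v => v)).getD 1

-- ===== PRECONDITION & SPEC =====
def Spec_nibble_longest_run (nibbles : List Int) (out : Int) : Prop := out = nibble_longest_run_alt nibbles
instance (nibbles : List Int) (out : Int) : Decidable (Spec_nibble_longest_run nibbles out) := by unfold Spec_nibble_longest_run; infer_instance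

-- ===== CLAIM (what is proved, stated in full; the proofs are below) =====
def Claim_equal_nibble_longest_run : Prop := ∀ (nibbles : List Int), Dom_nibble_longest_run nibbles → Spec_nibble_longest_run nibbles (nibble_longest_run nibbles)

-- ===== LEMMAS AND PROOFS =====
lemma rleAdd_eq_some (runs : List (Int × Int)) (x y : Int) (n : Int)
    (hg : runs.getLast? = some (y, n)) :
    rleAdd runs x = if y = x then runs.dropLast ++ [(y, n + 1)] else runs ++ [(x, 1)] := by
  unfold rleAdd; rw [hg]

lemma rleAdd_eq_none (runs : List (Int × Int)) (x : Int) (hg : runs.getLast? = none) :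
    rleAdd runs x = [(x, 1)] := by
  unfold rleAdd; rw [hg]

lemma rleAdd_ne_nil (runs : List (Int × Int)) (x : Int) : rleAdd runs x ≠ [] := by
  rcases hg : runs.getLast? with _ | ⟨y, n⟩
  · rw [rleAdd_eq_none _ _ hg]; simp
  · rw [rleAdd_eq_some _ _ _ _ hg]; split <;> simp

lemma rle_ne_nil (xs : List Int) (h : xs ≠ []) : xs.foldl rleAdd [] ≠ [] := by
  induction xs using List.reverseRecOn with
  | nil => exact absurd rfl h
  | append_singleton ys x ih => rw [List.foldl_append]; exact rleAdd_ne_nil _ _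

lemma rleAdd_last_val (runs : List (Int × Int)) (x : Int) :
    ((rleAdd runs x).getLast?).map (·.1) = some x := by
  rcases hg : runs.getLast? with _ | ⟨y, n⟩
  · rw [rleAdd_eq_none _ _ hg]; simp
  · rw [rleAdd_eq_some _ _ _ _ hg]
    split
    · next he => simp [he]
    · simp

lemma rle_last_val (xs : List Int) (h : xs ≠ []) :
    ((xs.foldl rleAdd []).getLast?).map (·.1) = some (xs.getLast h) := by
  induction xs using List.reverseRecOn with
  | nil => exact absurd rfl h
  | append_singleton ys x ih =>
    rw [List.foldl_append, List.getLast_concat]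
    exact rleAdd_last_val _ _

lemma rle_pos (xs : List Int) : ∀ p ∈ xs.foldl rleAdd [], 1 ≤ p.2 := by
  induction xs using List.reverseRecOn with
  | nil => simp
  | append_singleton ys x ih =>
    rw [List.foldl_append, List.foldl_cons, List.foldl_nil]
    rcases hg : (ys.foldl rleAdd []).getLast? with _ | ⟨y, n⟩
    · rw [rleAdd_eq_none _ _ hg]; simp
    · have hn : 1 ≤ n := ih _ (List.mem_of_getLast? hg)
      rw [rleAdd_eq_some _ _ _ _ hg]
      split
      · intro p hp
        rcases List.mem_append.1 hp with h1 | h1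
        · exact ih _ (List.dropLast_subset _ h1)
        · simp only [List.mem_singleton] at h1; subst h1; dsimp; omega
      · intro p hp
        rcases List.mem_append.1 hp with h1 | h1
        · exact ih _ h1
        · simp only [List.mem_singleton] at h1; subst h1; dsimp; omega

def runsMax (runs : List (Int × Int)) : Int := (runs.map (·.2)).foldl max 1
def lastLen (runs : List (Int × Int)) : Int := ((runs.getLast?).map (·.2)).getD 1

def stateA (xs : List Int) : Int × Int :=
  (PySem.List.pyRange 1 xs.length 1).foldl
    (fun (st : Int × Int) i =>
      if PySem.List.pyGetD xs i 0 = PySem.List.pyGetD xs (i - 1) 0 then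
        (max st.1 (st.2 + 1), st.2 + 1)
      else
        (st.1, 1))
    (1, 1)

lemma runsMax_concat (L : List (Int × Int)) (p : Int × Int) :
    runsMax (L ++ [p]) = max (runsMax L) p.2 := by
  simp [runsMax, List.foldl_append]

lemma one_le_runsMax (L : List (Int × Int)) : 1 ≤ runsMax L :=
  (PySem.List.le_foldl_max _ 1).1

lemma pyGetD_concat_lt (ys : List Int) (x : Int) (i : Int)
    (h0 : 0 ≤ i) (h1 : i < (ys.length : Int)) :
    PySem.List.pyGetD (ys ++ [x]) i 0 = PySem.List.pyGetD ys i 0 := by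
  rw [PySem.List.pyGetD_eq_getElem _ _ h0 (by simp; omega),
      PySem.List.pyGetD_eq_getElem _ _ h0 (by exact_mod_cast h1)]
  exact List.getElem_append_left (by omega)

lemma stateA_inv (xs : List Int) (h : xs ≠ []) :
    stateA xs = (runsMax (xs.foldl rleAdd []), lastLen (xs.foldl rleAdd [])) := by
  induction xs using List.reverseRecOn with
  | nil => exact absurd rfl h
  | append_singleton ys x ih =>
    rcases eq_or_ne ys [] with hys | hys
    · subst hys
      simp [stateA, runsMax, lastLen,
            show List.foldl rleAdd [] [x] = [(x, 1)] from rfl,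
            PySem.List.pyRange_one_eq_nil]
    · -- the last run of the RLE of ys
      have hr := rle_ne_nil ys hys
      rcases hg : (ys.foldl rleAdd []).getLast? with _ | ⟨y, c⟩
      · exact absurd (List.getLast?_eq_none_iff.1 hg) hr
      have hy : y = ys.getLast hys := by
        have := rle_last_val ys hys
        rw [hg] at this; simpa using this
      have hlast : lastLen (ys.foldl rleAdd []) = c := by simp [lastLen, hg]
      -- decompose A's loop: indices 1..len-1 over ys, then the final index len ys
      have hn : 1 ≤ (ys.length : Int) := by
        have : ys.length ≠ 0 := by simpa using hys
        omega
      have hlen : ((ys ++ [x]).length : Int) = (ys.length : Int) + 1 := by simp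
      have hsplit : PySem.List.pyRange 1 ((ys.length : Int) + 1) 1
          = PySem.List.pyRange 1 (ys.length : Int) 1 ++ [(ys.length : Int)] :=
        PySem.List.pyRange_one_succ_right hn
      have hcongr : (PySem.List.pyRange 1 (ys.length : Int) 1).foldl
          (fun (st : Int × Int) i =>
            if PySem.List.pyGetD (ys ++ [x]) i 0 = PySem.List.pyGetD (ys ++ [x]) (i - 1) 0 then
              (max st.1 (st.2 + 1), st.2 + 1)
            else (st.1, 1)) (1, 1) = stateA ys := by
        apply PySem.List.foldl_congr_mem
        intro acc i hi
        have hi' := PySem.List.mem_pyRange_one.1 hi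
        rw [pyGetD_concat_lt ys x i (by omega) (by omega),
            pyGetD_concat_lt ys x (i - 1) (by omega) (by omega)]
      have hgetn : PySem.List.pyGetD (ys ++ [x]) (ys.length : Int) 0 = x := by
        rw [PySem.List.pyGetD_eq_getElem _ _ (by omega) (by simp)]
        exact List.getElem_concat_length (by simp) _
      have hgetn1 : PySem.List.pyGetD (ys ++ [x]) ((ys.length : Int) - 1) 0 = ys.getLast hys := by
        rw [pyGetD_concat_lt ys x _ (by omega) (by omega),
            PySem.List.pyGetD_eq_getElem _ _ (by omega) (by omega)]
        rw [List.getLast_eq_getElem]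
        congr 1
        omega
      have hstep : stateA (ys ++ [x])
          = (if x = ys.getLast hys then
               (max (stateA ys).1 ((stateA ys).2 + 1), (stateA ys).2 + 1)
             else ((stateA ys).1, 1)) := by
        unfold stateA
        rw [hlen, hsplit, List.foldl_append, hcongr, List.foldl_cons, List.foldl_nil,
            hgetn, hgetn1]
        rfl
      -- B side: one rleAdd step on the RLE of ys
      rw [List.foldl_append, List.foldl_cons, List.foldl_nil,
          rleAdd_eq_some _ _ _ _ hg, hstep, ih hys, hlast]
      have hgl : (ys.foldl rleAdd []).getLast hr = (y, c) := by
        rw [List.getLast?_eq_some_getLast hr] at hg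
        exact Option.some.inj hg
      rcases eq_or_ne x (ys.getLast hys) with hx | hx
      · rw [if_pos hx, if_pos (hy.trans hx.symm)]
        have hrdec : ys.foldl rleAdd [] = (ys.foldl rleAdd []).dropLast ++ [(y, c)] := by
          conv_lhs => rw [← List.dropLast_append_getLast hr]
          rw [hgl]
        have h1 : runsMax ((ys.foldl rleAdd []).dropLast ++ [(y, c + 1)])
            = max (runsMax ((ys.foldl rleAdd []).dropLast)) (c + 1) := runsMax_concat _ _
        have h2 : runsMax (ys.foldl rleAdd [])
            = max (runsMax ((ys.foldl rleAdd []).dropLast)) c := by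
          conv_lhs => rw [hrdec]
          exact runsMax_concat _ _
        dsimp only
        rw [h1, h2]
        simp only [lastLen, List.getLast?_concat, Option.map_some, Option.getD_some,
                   Prod.mk.injEq]
        exact ⟨by omega, trivial⟩
      · rw [if_neg hx, if_neg (fun he => hx (he.symm.trans hy))]
        have h1 : runsMax (ys.foldl rleAdd [] ++ [(x, 1)]) = runsMax (ys.foldl rleAdd []) := by
          rw [runsMax_concat]
          have := one_le_runsMax (ys.foldl rleAdd [])
          omega
        simp [h1, lastLen]

-- ===== VERDICT (by name: the statement is the Claim_ definition above) =====
theorem nibble_longest_run_spec : Claim_equal_nibble_longest_run := by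
  intro xs _
  unfold Spec_nibble_longest_run
  rcases eq_or_ne xs [] with h | h
  · subst h; rfl
  · have hA : nibble_longest_run xs = (stateA xs).1 := rfl
    rw [hA, stateA_inv xs h]
    unfold nibble_longest_run_alt
    rcases hr : xs.foldl rleAdd [] with _ | ⟨p, t⟩
    · exact absurd hr (rle_ne_nil xs h)
    have hp : 1 ≤ p.2 := rle_pos xs p (hr ▸ List.mem_cons_self)
    dsimp only
    simp only [List.map_cons]
    rw [PySem.List.max?_id_cons]
    simp only [Option.getD_some]
    unfold runsMax
    simp only [List.map_cons, List.foldl_cons]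
    have hm : max 1 p.2 = p.2 := by omega
    rw [hm]
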